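-- pv_equiv track=rewrite | github.com/Aerysaint/Paddy | src/detect.py | _is_structural_heading
-- ===== SOURCE A (Python) =====
-- def _is_structural_heading(text: str) -> bool:
--     """
--     Check if text is a structural heading (Abstract, Introduction, etc.).
--
--     Args:
--         text: Text content to check
--
--     Returns:
--         True if this is a structural heading
--     """
--     text_lower = text.lower().strip()
--
--     # Common structural headings in research papers
--     structural_headings = [
--         'abstract', 'introduction', 'background', 'related work',
--         'methodology', 'method', 'methods', 'approach', 'model',
--         'model architecture', 'architecture', 'implementation',
--         'experiments', 'experimental setup', 'evaluation',
--         'results', 'discussion', 'conclusion', 'conclusions',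
--         'future work', 'acknowledgments', 'acknowledgements',
--         'references', 'bibliography', 'appendix'
--     ]
--
--     for heading in structural_headings:
--         if text_lower == heading or text_lower.startswith(heading + ' '):
--             return True
--
--     return False
-- ===== SOURCE B (Python) =====
-- _HEADINGS = frozenset([
--     'abstract', 'introduction', 'background', 'related work',
--     'methodology', 'method', 'methods', 'approach', 'model',
--     'model architecture', 'architecture', 'implementation',
--     'experiments', 'experimental setup', 'evaluation',
--     'results', 'discussion', 'conclusion', 'conclusions',
--     'future work', 'acknowledgments', 'acknowledgements',
--     'references', 'bibliography', 'appendix'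
-- ])
--
--
-- def _is_structural_heading(text: str) -> bool:
--     """Single left-to-right pass: at every space boundary (and at the end)
--     test the accumulated prefix against a frozenset of headings."""
--     t = text.lower().strip()
--     prefix = []
--     for ch in t:
--         if ch == ' ' and ''.join(prefix) in _HEADINGS:
--             return True
--         prefix.append(ch)
--     return ''.join(prefix) in _HEADINGS
-- ===== Notes on version B (the rewrite author's own statement) =====
-- stated objective: alternative
-- what changed: Replaces A's scan over the 26-heading list with equality/startswith tests by a single left-to-right pass over the text that tests each space-boundary prefix for membership in a frozenset of headings.
import Mathlib
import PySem

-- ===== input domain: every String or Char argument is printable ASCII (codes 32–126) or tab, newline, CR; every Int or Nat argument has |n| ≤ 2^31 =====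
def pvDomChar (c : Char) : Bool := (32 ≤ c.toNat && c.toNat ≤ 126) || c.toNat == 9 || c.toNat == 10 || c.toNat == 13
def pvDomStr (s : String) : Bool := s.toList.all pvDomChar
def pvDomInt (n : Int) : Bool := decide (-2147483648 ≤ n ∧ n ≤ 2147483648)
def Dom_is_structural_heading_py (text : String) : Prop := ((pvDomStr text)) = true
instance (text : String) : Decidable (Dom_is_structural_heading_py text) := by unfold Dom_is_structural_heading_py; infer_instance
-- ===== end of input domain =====

-- B replaces the scan over the heading list by one pass over the text testing
-- space-boundary prefixes against a set of headings (alternative decomposition).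

-- ===== PORT A =====
-- the literal heading list of A (B's frozenset is built from the same literals)
def pvHeadingList : List (List Char) :=
  ["abstract", "introduction", "background", "related work",
   "methodology", "method", "methods", "approach", "model",
   "model architecture", "architecture", "implementation",
   "experiments", "experimental setup", "evaluation",
   "results", "discussion", "conclusion", "conclusions",
   "future work", "acknowledgments", "acknowledgements",
   "references", "bibliography", "appendix"].map String.toList

def is_structural_heading_py (text : String) : Bool :=
  let tl := PySem.Chars.strip (PySem.Chars.lower text.toList)
  pvHeadingList.any (fun h => tl == h || PySem.Chars.startswith tl (h ++ [' ']))

-- ===== PORT B =====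
def pvHeadingSet : PySem.Set (List Char) := PySem.Set.ofList pvHeadingList

def pvAltLoop (acc : List Char) : List Char → Bool
  | [] => PySem.Set.contains pvHeadingSet acc
  | c :: rest =>
      if c == ' ' && PySem.Set.contains pvHeadingSet acc then true
      else pvAltLoop (acc ++ [c]) rest

def is_structural_heading_py_alt (text : String) : Bool :=
  pvAltLoop [] (PySem.Chars.strip (PySem.Chars.lower text.toList))

-- ===== PRECONDITION & SPEC =====
def Spec_is_structural_heading_py (text : String) (out : Bool) : Prop := out = is_structural_heading_py_alt text
instance (text : String) (out : Bool) : Decidable (Spec_is_structural_heading_py text out) := by unfold Spec_is_structural_heading_py; infer_instance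

-- ===== CLAIM (what is proved, stated in full; the proofs are below) =====
def Claim_equal_is_structural_heading_py : Prop := ∀ (text : String), Dom_is_structural_heading_py text → Spec_is_structural_heading_py text (is_structural_heading_py text)

-- ===== LEMMAS AND PROOFS =====

-- B's loop: true iff the whole string (acc ++ cs) is a heading, or some
-- space-boundary prefix extending acc is a heading.
theorem pvAltLoop_iff (cs acc : List Char) :
    pvAltLoop acc cs = true ↔
      (acc ++ cs) ∈ pvHeadingList ∨
        ∃ u v, cs = u ++ ' ' :: v ∧ (acc ++ u) ∈ pvHeadingList := by
  induction cs generalizing acc with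
  | nil =>
      simp [pvAltLoop, pvHeadingSet, PySem.Set.mem_ofList]
  | cons c rest ih =>
      by_cases hc : (c == ' ' && PySem.Set.contains pvHeadingSet acc) = true
      · simp only [pvAltLoop, if_pos hc]
        simp only [Bool.and_eq_true, beq_iff_eq, pvHeadingSet,
          PySem.Set.contains_iff, PySem.Set.mem_ofList] at hc
        obtain ⟨rfl, hm⟩ := hc
        constructor
        · intro _; exact Or.inr ⟨[], rest, by simp, by simpa using hm⟩
        · intro _; trivial
      · simp only [pvAltLoop, if_neg hc]
        rw [ih]
        simp only [Bool.and_eq_true, beq_iff_eq, pvHeadingSet,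
          PySem.Set.contains_iff, PySem.Set.mem_ofList, not_and] at hc
        constructor
        · rintro (h | ⟨u, v, rfl, hm⟩)
          · exact Or.inl (by simpa using h)
          · exact Or.inr ⟨c :: u, v, by simp, by simpa using hm⟩
        · rintro (h | ⟨u, v, huv, hm⟩)
          · exact Or.inl (by simpa using h)
          · cases u with
            | nil =>
                simp only [List.nil_append] at huv
                injection huv with h1 h2
                subst h1
                exact absurd (by simpa using hm) (hc rfl)
            | cons c' u' =>
                simp only [List.cons_append] at huv
                injection huv with h1 h2
                subst h1
                exact Or.inr ⟨u', v, h2, by simpa using hm⟩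

-- A's per-heading test, rephrased: the whole string is a heading or some
-- space-boundary prefix is a heading.
theorem pvA_iff (tl : List Char) :
    (pvHeadingList.any (fun h => tl == h || PySem.Chars.startswith tl (h ++ [' ']))) = true ↔
      tl ∈ pvHeadingList ∨ ∃ u v, tl = u ++ ' ' :: v ∧ u ∈ pvHeadingList := by
  rw [List.any_eq_true]
  constructor
  · rintro ⟨h, hh, hcond⟩
    rcases (by simpa [PySem.Chars.startswith_iff] using hcond : tl = h ∨ (h ++ [' ']) <+: tl) with rfl | hpre
    · exact Or.inl hh
    · obtain ⟨v, hv⟩ := hpre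
      exact Or.inr ⟨h, v, by simpa using hv.symm, hh⟩
  · rintro (hm | ⟨u, v, rfl, hm⟩)
    · exact ⟨tl, hm, by simp⟩
    · refine ⟨u, hm, ?_⟩
      have hs : PySem.Chars.startswith (u ++ ' ' :: v) (u ++ [' ']) = true := by
        rw [PySem.Chars.startswith_iff]
        exact ⟨v, by simp⟩
      simp [hs]

-- ===== VERDICT (by name: the statement is the Claim_ definition above) =====
theorem is_structural_heading_py_spec : Claim_equal_is_structural_heading_py := by
  intro text _
  unfold Spec_is_structural_heading_py is_structural_heading_py is_structural_heading_py_alt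
  rw [Bool.eq_iff_iff, pvA_iff, pvAltLoop_iff]
  simp
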